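-- pv_equiv track=rewrite | github.com/aalberg/advent_of_code | 2023/problem22.py | make_brick
-- ===== SOURCE A (Python) =====
-- def make_brick(bs, be):
--   brick = []
--   if bs[0] != be[0]:
--     for x in range(bs[0], be[0] + 1):
--       brick.append([x, bs[1], bs[2]])
--   elif bs[1] != be[1]:
--     for y in range(bs[1], be[1] + 1):
--       brick.append([bs[0], y, bs[2]])
--   elif bs[2] != be[2]:
--     for z in range(bs[2], be[2] + 1):
--       brick.append([bs[0], bs[1], z])
--   else:
--     brick.append(bs)
--   return brick
-- ===== SOURCE B (Python) =====
-- def make_brick(bs, be):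
--   # Factor the brick into per-axis ranges, then take their Cartesian product.
--   ranges = []
--   k = 0
--   while k < 3 and bs[k] == be[k]:
--     ranges.append([bs[k]])
--     k += 1
--   if k == 3:
--     return [bs]
--   ranges.append(range(bs[k], be[k] + 1))
--   ranges.extend([v] for v in bs[k + 1:3])
--   cells = [[]]
--   for r in ranges:
--     cells = [c + [v] for c in cells for v in r]
--   return cells
-- ===== Notes on version B (the rewrite author's own statement) =====
-- stated objective: alternative
-- what changed: B factors the brick into per-axis coordinate ranges (singletons for equal axes, one interval at the first differing axis) and builds the cells as the Cartesian product of those ranges via a column-by-column fold, instead of A's three copy-pasted axis-specific loops that each emit complete 3-cells.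
import Mathlib
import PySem

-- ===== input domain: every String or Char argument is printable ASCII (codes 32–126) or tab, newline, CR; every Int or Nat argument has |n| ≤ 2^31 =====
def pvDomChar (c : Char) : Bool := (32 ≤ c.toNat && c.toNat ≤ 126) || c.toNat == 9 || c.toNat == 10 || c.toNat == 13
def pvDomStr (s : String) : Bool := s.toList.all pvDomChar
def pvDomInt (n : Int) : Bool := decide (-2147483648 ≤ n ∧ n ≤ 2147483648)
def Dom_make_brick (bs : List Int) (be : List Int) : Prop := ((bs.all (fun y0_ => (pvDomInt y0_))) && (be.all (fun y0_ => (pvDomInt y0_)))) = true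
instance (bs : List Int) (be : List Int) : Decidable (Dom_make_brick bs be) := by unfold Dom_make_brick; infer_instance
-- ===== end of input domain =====

-- B factors the brick into per-axis coordinate ranges and builds the cells as their
-- Cartesian product, instead of A's three copy-pasted axis-specific loops (objective: simpler).

-- ===== PORT A =====
-- A indexes bs/be up to index 2; the port reads via pyGet? with default 0, which is
-- only exercised inside Pre_make_brick (where every access Python performs is in range).
def make_brick (bs : List Int) (be : List Int) : List (List Int) :=
  let g := fun (l : List Int) (i : Int) => (PySem.List.pyGet? l i).getD 0
  if g bs 0 ≠ g be 0 then
    (PySem.List.pyRange (g bs 0) (g be 0 + 1) 1).foldl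
      (fun brick x => brick ++ [[x, g bs 1, g bs 2]]) []
  else if g bs 1 ≠ g be 1 then
    (PySem.List.pyRange (g bs 1) (g be 1 + 1) 1).foldl
      (fun brick y => brick ++ [[g bs 0, y, g bs 2]]) []
  else if g bs 2 ≠ g be 2 then
    (PySem.List.pyRange (g bs 2) (g be 2 + 1) 1).foldl
      (fun brick z => brick ++ [[g bs 0, g bs 1, z]]) []
  else [bs]

-- ===== PORT B =====
-- the `while k < 3 and bs[k] == be[k]` loop of Source B; fuel 3 = the loop's literal bound
def mbWhile (bs be : List Int) : Nat → Nat → List (List Int) → (List (List Int) × Nat)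
  | 0, k, ranges => (ranges, k)
  | fuel+1, k, ranges =>
    if k < 3 ∧ (PySem.List.pyGet? bs (k : Int)).getD 0 = (PySem.List.pyGet? be (k : Int)).getD 0 then
      mbWhile bs be fuel (k+1) (ranges ++ [[(PySem.List.pyGet? bs (k : Int)).getD 0]])
    else (ranges, k)

def make_brick_alt (bs : List Int) (be : List Int) : List (List Int) :=
  let g := fun (l : List Int) (i : Int) => (PySem.List.pyGet? l i).getD 0
  let res := mbWhile bs be 3 0 []
  let k := res.2
  if k = 3 then [bs]
  else
    let ranges := res.1 ++ [PySem.List.pyRange (g bs (k : Int)) (g be (k : Int) + 1) 1]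
        ++ (PySem.List.slice bs (some ((k : Int) + 1)) (some 3)).map (fun v => [v])
    ranges.foldl (fun cells r => cells.flatMap (fun c => r.map (fun v => c ++ [v]))) [[]]

-- ===== PRECONDITION & SPEC =====
-- Pre_ is exactly the set of inputs on which Python A returns (elsewhere A raises
-- IndexError): both lists nonempty, and each index access A actually performs is in
-- range (a loop body is only entered when its range is nonempty, so e.g. bs=[2],
-- be=[1] returns [] and is admitted).
def Pre_make_brick (bs : List Int) (be : List Int) : Prop :=
  1 ≤ bs.length ∧ 1 ≤ be.length ∧
  (if bs.getD 0 0 ≠ be.getD 0 0 then (be.getD 0 0 < bs.getD 0 0 ∨ 3 ≤ bs.length)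
   else 2 ≤ bs.length ∧ 2 ≤ be.length ∧
     (if bs.getD 1 0 ≠ be.getD 1 0 then (be.getD 1 0 < bs.getD 1 0 ∨ 3 ≤ bs.length)
      else 3 ≤ bs.length ∧ 3 ≤ be.length))
instance (bs : List Int) (be : List Int) : Decidable (Pre_make_brick bs be) := by
  unfold Pre_make_brick; infer_instance

def pvWitness_make_brick : List Int × List Int := ([1, 2, 3], [1, 2, 5])

def Spec_make_brick (bs : List Int) (be : List Int) (out : List (List Int)) : Prop := out = make_brick_alt bs be
instance (bs : List Int) (be : List Int) (out : List (List Int)) : Decidable (Spec_make_brick bs be out) := by unfold Spec_make_brick; infer_instance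

-- ===== CLAIM (what is proved, stated in full; the proofs are below) =====
def Claim_equal_make_brick : Prop := ∀ (bs : List Int) (be : List Int), Dom_make_brick bs be → Pre_make_brick bs be → Spec_make_brick bs be (make_brick bs be)

-- ===== LEMMAS AND PROOFS =====

lemma cartfold_nil (rs : List (List Int)) :
    rs.foldl (fun cells r => (List.map (fun c => List.map (fun v => c ++ [v]) r) cells).flatten)
      ([] : List (List Int)) = [] := by
  induction rs with
  | nil => rfl
  | cons r rs ih => simpa using ih

lemma flatten_map_singleton (l : List Int) (f : Int → List Int) :
    (l.map (fun x => [f x])).flatten = l.map f := by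
  induction l with
  | nil => rfl
  | cons x xs ih => simp [ih]

lemma pg0 (x : Int) (l : List Int) : PySem.List.pyGet? (x :: l) 0 = some x := by
  simp [PySem.List.pyGet?, PySem.List.pyIdx?]

lemma sl1 (x y z : Int) (l : List Int) :
    PySem.List.slice (x :: y :: z :: l) (some 1) (some 3) = [y, z] := by
  rw [PySem.List.slice_toNat _ (by norm_num) (by norm_num)]; rfl

lemma sl2 (x y z : Int) (l : List Int) :
    PySem.List.slice (x :: y :: z :: l) (some 2) (some 3) = [z] := by
  rw [PySem.List.slice_toNat _ (by norm_num) (by norm_num)]; rfl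

lemma sl3 (x y z : Int) (l : List Int) :
    PySem.List.slice (x :: y :: z :: l) (some 3) (some 3) = [] := by
  rw [PySem.List.slice_toNat _ (by norm_num) (by norm_num)]; rfl

lemma pg1 (x y : Int) (l : List Int) : PySem.List.pyGet? (x :: y :: l) 1 = some y := by
  simp [PySem.List.pyGet?, PySem.List.pyIdx?]

lemma pg2 (x y z : Int) (l : List Int) : PySem.List.pyGet? (x :: y :: z :: l) 2 = some z := by
  have h2 : (2 : Int) ≤ (l.length : Int) + 1 + 1 := by omega
  simp [PySem.List.pyGet?, PySem.List.pyIdx?, h2]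

-- ===== VERDICT (by name: the statement is the Claim_ definition above) =====
theorem make_brick_spec : Claim_equal_make_brick := by
  intro bs be _ hpre
  unfold Spec_make_brick make_brick make_brick_alt
  obtain ⟨hb, he, h⟩ := hpre
  rcases bs with _ | ⟨a, bt⟩
  · simp at hb
  rcases be with _ | ⟨c, ct⟩
  · simp at he
  simp only [List.getD, List.getElem?_cons_zero, Option.getD_some] at h
  by_cases h0 : a = c
  · subst h0
    rw [if_neg (by simp)] at h
    obtain ⟨hb2, he2, h⟩ := h
    rcases bt with _ | ⟨b, bt2⟩
    · simp at hb2
    rcases ct with _ | ⟨d, ct2⟩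
    · simp at he2
    simp only [List.getElem?_cons_succ, List.getElem?_cons_zero, Option.getD_some] at h
    by_cases h1 : b = d
    · subst h1
      rw [if_neg (by simp)] at h
      obtain ⟨hb3, he3⟩ := h
      rcases bt2 with _ | ⟨e, bt3⟩
      · simp at hb3
      rcases ct2 with _ | ⟨f, ct3⟩
      · simp at he3
      by_cases h2 : e = f
      · subst h2
        simp [mbWhile, pg1, pg2]
      · simp [mbWhile, pg0, pg1, pg2, h2, sl3, List.flatMap, flatten_map_singleton]
    · rw [if_pos (by simpa using h1)] at h
      rcases h with hlt | hlen
      · have hnil : PySem.List.pyRange b (d + 1) 1 = [] :=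
          PySem.List.pyRange_one_eq_nil (by omega)
        simp [mbWhile, pg0, pg1, h1, hnil, List.flatMap, cartfold_nil]
      · rcases bt2 with _ | ⟨e, bt3⟩
        · simp at hlen
        simp [mbWhile, pg1, pg2, h1, sl2, List.flatMap, flatten_map_singleton,
          Function.comp_def]
  · rw [if_pos (by simpa using h0)] at h
    rcases h with hlt | hlen
    · have hnil : PySem.List.pyRange a (c + 1) 1 = [] :=
        PySem.List.pyRange_one_eq_nil (by omega)
      simp [mbWhile, h0, hnil, List.flatMap, cartfold_nil]
    · rcases bt with _ | ⟨b, bt2⟩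
      · simp at hlen
      rcases bt2 with _ | ⟨e, bt3⟩
      · simp at hlen
      simp [mbWhile, pg1, pg2, h0, sl1, List.flatMap, flatten_map_singleton,
        Function.comp_def]
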